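-- pv_equiv track=rewrite | github.com/uysalserkan/AnkaComp-Season-V | Algoritmalar I/DP_Change-making.py | min_step_target
-- ===== SOURCE A (Python) =====
-- def min_step_target(coins_, target_):
--     # (LeetCode #322 - Medium) Change-Making Problemi - Dinamik Programlama
--     result = [target_ + 1] * (target_ + 1)
--     result[0] = 0
--
--     for sub_target in range(1, target_ + 1):
--         for coin in coins_:
--             if coin <= sub_target:
--                 result[sub_target] = min(result[sub_target], 1 + result[sub_target - coin])
--
--     return result
-- ===== SOURCE B (Python) =====
-- def min_step_target(coins_, target_):
--     # BFS over amounts: level d discovers exactly the amounts needing d coins,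
--     # instead of filling a DP table by recurrence.
--     INF = target_ + 1
--     dist = [INF] * (target_ + 1)
--     dist[0] = 0
--     frontier = [0]
--     for d in range(1, target_ + 1):
--         nxt = []
--         for s in frontier:
--             for c in coins_:
--                 t = s + c
--                 if 0 < c and t <= target_ and dist[t] > d:
--                     dist[t] = d
--                     nxt.append(t)
--         frontier = nxt
--     return dist
-- ===== Notes on version B (the rewrite author's own statement) =====
-- stated objective: alternative
-- what changed: B replaces the DP-recurrence table fill with a breadth-first search over amounts: starting from 0, level d discovers exactly the amounts makeable with d coins, writing each table entry at most once and scanning coins only from reachable frontier amounts; unreachable amounts keep the sentinel target_+1, which provably yields the identical final table.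
import Mathlib
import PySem

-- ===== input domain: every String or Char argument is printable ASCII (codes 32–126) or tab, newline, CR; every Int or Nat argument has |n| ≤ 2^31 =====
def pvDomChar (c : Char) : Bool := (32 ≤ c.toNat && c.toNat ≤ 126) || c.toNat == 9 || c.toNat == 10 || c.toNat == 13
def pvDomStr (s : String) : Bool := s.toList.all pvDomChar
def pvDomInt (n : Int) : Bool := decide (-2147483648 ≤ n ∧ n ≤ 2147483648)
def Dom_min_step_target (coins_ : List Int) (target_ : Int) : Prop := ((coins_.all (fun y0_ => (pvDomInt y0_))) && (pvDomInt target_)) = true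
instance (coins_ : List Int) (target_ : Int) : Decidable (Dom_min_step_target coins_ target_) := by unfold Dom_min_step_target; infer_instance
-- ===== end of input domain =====

-- B replaces the bottom-up DP recurrence with a breadth-first search over amounts
-- (level d discovers exactly the amounts needing d coins); same final table ('alternative').

-- ===== PORT A =====
-- result = [target_+1]*(target_+1); result[0] = 0; outer loop over amounts, inner over coins.
def min_step_target (coins_ : List Int) (target_ : Int) : List Int :=
  (PySem.List.pyRange 1 (target_ + 1) 1).foldl
    (fun res sub_target =>
      coins_.foldl
        (fun res coin =>
          if coin ≤ sub_target then
            PySem.List.pySetD res sub_target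
              (min (PySem.List.pyGetD res sub_target 0)
                   (1 + PySem.List.pyGetD res (sub_target - coin) 0))
          else res)
        res)
    (PySem.List.pySetD (List.replicate (target_ + 1).toNat (target_ + 1)) 0 0)

-- ===== PORT B =====
-- BFS: state = (dist, frontier); each level d starts with nxt = [] and relaxes every
-- edge s → s+c from the frontier, appending newly discovered amounts.
def min_step_target_alt (coins_ : List Int) (target_ : Int) : List Int :=
  ((PySem.List.pyRange 1 (target_ + 1) 1).foldl
    (fun (st : List Int × List Int) d =>
      st.2.foldl
        (fun (st2 : List Int × List Int) s =>
          coins_.foldl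
            (fun (st3 : List Int × List Int) c =>
              if 0 < c ∧ s + c ≤ target_ ∧ d < PySem.List.pyGetD st3.1 (s + c) 0 then
                (PySem.List.pySetD st3.1 (s + c) d, st3.2 ++ [s + c])
              else st3)
            st2)
        (st.1, ([] : List Int)))
    (PySem.List.pySetD (List.replicate (target_ + 1).toNat (target_ + 1)) 0 0, [0])).1

-- ===== PRECONDITION & SPEC =====
-- A raises IndexError when target_ < 0 (result[0] = 0 on an empty list) and when target_ ≥ 1
-- and some coin is negative (result[sub_target - coin] overruns the table at sub_target = target_);
-- Pre_ excludes exactly those inputs.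
def Pre_min_step_target (coins_ : List Int) (target_ : Int) : Prop :=
  0 ≤ target_ ∧ (1 ≤ target_ → ∀ c ∈ coins_, 0 ≤ c)
instance (coins_ : List Int) (target_ : Int) : Decidable (Pre_min_step_target coins_ target_) := by
  unfold Pre_min_step_target; infer_instance

def pvWitness_min_step_target : List Int × Int := ([1, 2, 5], 11)

def Spec_min_step_target (coins_ : List Int) (target_ : Int) (out : List Int) : Prop := out = min_step_target_alt coins_ target_
instance (coins_ : List Int) (target_ : Int) (out : List Int) : Decidable (Spec_min_step_target coins_ target_ out) := by unfold Spec_min_step_target; infer_instance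

-- ===== CLAIM (what is proved, stated in full; the proofs are below) =====
def Claim_equal_min_step_target : Prop := ∀ (coins_ : List Int) (target_ : Int), Dom_min_step_target coins_ target_ → Pre_min_step_target coins_ target_ → Spec_min_step_target coins_ target_ (min_step_target coins_ target_)

-- ===== LEMMAS AND PROOFS =====

-- ---- generic table helpers: a DP table of length n viewed as a function on indices ----
def pvTbl (n : Nat) (f : Int → Int) : List Int := (List.range n).map (fun j : Nat => f (j : Int))

theorem pvTbl_length (n : Nat) (f : Int → Int) : (pvTbl n f).length = n := by
  simp [pvTbl]

theorem pvTbl_congr {n : Nat} {f g : Int → Int}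
    (h : ∀ j : Nat, j < n → f (j : Int) = g (j : Int)) : pvTbl n f = pvTbl n g := by
  unfold pvTbl
  apply List.map_congr_left
  intro a ha
  exact h a (List.mem_range.mp ha)

theorem pvTbl_getElem {n : Nat} (f : Int → Int) {k : Nat} (hk : k < n) :
    (pvTbl n f)[k]'(by simpa [pvTbl] using hk) = f (k : Int) := by
  simp [pvTbl]

theorem pvTbl_pyGetD {n : Nat} (f : Int → Int) {i : Int} (h0 : 0 ≤ i) (h1 : i < (n : Int)) :
    PySem.List.pyGetD (pvTbl n f) i 0 = f i := by
  have hlen : i < ((pvTbl n f).length : Int) := by rw [pvTbl_length]; exact h1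
  rw [PySem.List.pyGetD_eq_getElem _ _ h0 hlen]
  have hi : i.toNat < n := by omega
  rw [pvTbl_getElem f hi]
  congr 1
  omega

theorem pySetD_set (xs : List Int) {i : Int} (v : Int) (h0 : 0 ≤ i) (h1 : i < (xs.length : Int)) :
    PySem.List.pySetD xs i v = xs.set i.toNat v := by
  unfold PySem.List.pySetD PySem.List.pySet? PySem.List.pyIdx?
  simp [h0, h1]

theorem pvTbl_pySetD {n : Nat} (f : Int → Int) {i : Int} (v : Int) (h0 : 0 ≤ i) (h1 : i < (n : Int)) :
    PySem.List.pySetD (pvTbl n f) i v = pvTbl n (fun j => if j = i then v else f j) := by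
  have hlen : i < ((pvTbl n f).length : Int) := by rw [pvTbl_length]; exact h1
  rw [pySetD_set _ v h0 hlen]
  apply List.ext_getElem
  · simp [pvTbl]
  · intro k hk1 hk2
    have hk : k < n := by simpa [pvTbl] using hk2
    rw [List.getElem_set, pvTbl_getElem f hk, pvTbl_getElem (fun j => if j = i then v else f j) hk]
    by_cases hki : i.toNat = k
    · have : ((k : Int)) = i := by omega
      simp [hki, this]
    · have : ¬((k : Int) = i) := by omega
      simp [hki, this]

-- ---- model of A: the table of minimal counts, built row by row ----
def pvStepG (g : Int → Int) (s : Int) (v c : Int) : Int :=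
  if 1 ≤ c ∧ c ≤ s then min v (1 + g (s - c)) else v

def pvTblG (coins : List Int) (T : Int) : Nat → List Int
  | 0 => [0]
  | m + 1 =>
    let p := pvTblG coins T m
    p ++ [coins.foldl (pvStepG (fun j => p.getD j.toNat 0) ((m : Int) + 1)) T]

def pvG (coins : List Int) (T : Int) (i : Int) : Int := (pvTblG coins T i.toNat).getD i.toNat 0

theorem pvTblG_length (coins : List Int) (T : Int) (m : Nat) : (pvTblG coins T m).length = m + 1 := by
  induction m with
  | zero => rfl
  | succ m ih => simp [pvTblG, ih]

theorem pvTblG_stable (coins : List Int) (T : Int) {k m : Nat} (h : k ≤ m) :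
    (pvTblG coins T m).getD k 0 = pvG coins T (k : Int) := by
  induction m with
  | zero =>
    have : k = 0 := by omega
    subst this
    simp [pvG]
  | succ m ih =>
    by_cases hk : k ≤ m
    · rw [← ih hk]
      show (pvTblG coins T m ++ _).getD k 0 = _
      have hlt : k < (pvTblG coins T m).length := by rw [pvTblG_length]; omega
      simp [List.getD, List.getElem?_append_left hlt]
    · have hk1 : k = m + 1 := by omega
      subst hk1
      simp [pvG]

theorem pvG_nonpos (coins : List Int) (T : Int) {i : Int} (h : i ≤ 0) : pvG coins T i = 0 := by
  have : i.toNat = 0 := by omega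
  simp [pvG, this, pvTblG]

theorem pvG_rec (coins : List Int) (T : Int) (m : Nat) :
    pvG coins T ((m : Int) + 1) = coins.foldl (pvStepG (pvG coins T) ((m : Int) + 1)) T := by
  have htn : ((m : Int) + 1).toNat = m + 1 := by omega
  have hlen : (pvTblG coins T m).length = m + 1 := pvTblG_length coins T m
  have hstep : pvG coins T ((m : Int) + 1)
      = coins.foldl (pvStepG (fun j => (pvTblG coins T m).getD j.toNat 0) ((m : Int) + 1)) T := by
    show (pvTblG coins T ((m : Int) + 1).toNat).getD ((m : Int) + 1).toNat 0 = _
    rw [htn]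
    show (pvTblG coins T m ++ [_]).getD (m + 1) 0 = _
    simp [List.getD, hlen]
  rw [hstep]
  apply List.foldl_ext
  intro a c hc
  unfold pvStepG
  by_cases hg : 1 ≤ c ∧ c ≤ (m : Int) + 1
  · have hk : ((m : Int) + 1 - c).toNat ≤ m := by omega
    have hcast : ((((m : Int) + 1 - c).toNat : Int)) = (m : Int) + 1 - c := by omega
    rw [if_pos hg, if_pos hg, ← hcast]
    beta_reduce
    simp only [Int.toNat_natCast]
    rw [pvTblG_stable coins T hk]
  · rw [if_neg hg, if_neg hg]

-- ---- basic bounds on pvG ----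
theorem pv_foldl_le_init (g : Int → Int) (s : Int) (l : List Int) : ∀ a : Int,
    l.foldl (pvStepG g s) a ≤ a := by
  induction l with
  | nil => intro a; exact le_refl _
  | cons c l ih =>
    intro a
    refine le_trans (ih _) ?_
    unfold pvStepG
    split
    · exact min_le_left _ _
    · exact le_refl _

theorem pv_foldl_le_term (g : Int → Int) (s : Int) {l : List Int} {c : Int} (hm : c ∈ l)
    (h1 : 1 ≤ c) (h2 : c ≤ s) : ∀ a : Int, l.foldl (pvStepG g s) a ≤ 1 + g (s - c) := by
  induction l with
  | nil => cases hm
  | cons d l ih =>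
    intro a
    rcases List.mem_cons.mp hm with hdc | htail
    · subst hdc
      refine le_trans (pv_foldl_le_init g s l _) ?_
      unfold pvStepG
      rw [if_pos ⟨h1, h2⟩]
      exact min_le_right _ _
    · exact ih htail _

theorem pv_le_foldl (g : Int → Int) (s : Int) (l : List Int) {x : Int}
    (h : ∀ c ∈ l, 1 ≤ c → c ≤ s → x ≤ 1 + g (s - c)) :
    ∀ a : Int, x ≤ a → x ≤ l.foldl (pvStepG g s) a := by
  induction l with
  | nil => intro a ha; exact ha
  | cons c l ih =>
    intro a ha
    refine ih (fun d hd => h d (List.mem_cons_of_mem _ hd)) _ ?_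
    unfold pvStepG
    by_cases hg : 1 ≤ c ∧ c ≤ s
    · rw [if_pos hg]
      exact le_min ha (h c List.mem_cons_self hg.1 hg.2)
    · rw [if_neg hg]; exact ha

theorem pv_foldl_cases (g : Int → Int) (s : Int) (l : List Int) : ∀ a : Int,
    l.foldl (pvStepG g s) a = a ∨
      ∃ c ∈ l, 1 ≤ c ∧ c ≤ s ∧ l.foldl (pvStepG g s) a = 1 + g (s - c) := by
  induction l with
  | nil => intro a; left; rfl
  | cons c l ih =>
    intro a
    rcases ih (pvStepG g s a c) with h | ⟨d, hd, h1, h2, h3⟩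
    · rw [List.foldl_cons, h]
      unfold pvStepG
      by_cases hg : 1 ≤ c ∧ c ≤ s
      · rw [if_pos hg]
        rcases le_total a (1 + g (s - c)) with hle | hle
        · left; exact min_eq_left hle
        · right; exact ⟨c, List.mem_cons_self, hg.1, hg.2, min_eq_right hle⟩
      · left; rw [if_neg hg]
    · right
      exact ⟨d, List.mem_cons_of_mem _ hd, h1, h2, by rw [List.foldl_cons]; exact h3⟩

theorem pvG_nonneg (cs : List Int) (C : Int) (hC : 0 ≤ C) : ∀ s : Int, 0 ≤ pvG cs C s := by
  have main : ∀ k : Nat, ∀ s : Int, s.toNat = k → 0 ≤ pvG cs C s := by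
    intro k
    induction k using Nat.strong_induction_on with
    | _ k ihk =>
      intro s hsk
      by_cases hs1 : 1 ≤ s
      · obtain ⟨m, hm⟩ : ∃ m : Nat, s = (m : Int) + 1 := ⟨s.toNat - 1, by omega⟩
        subst hm
        rw [pvG_rec]
        apply pv_le_foldl _ _ _ _ C hC
        intro c hc h1 h2
        have := ihk ((m : Int) + 1 - c).toNat (by omega) _ rfl
        omega
      · rw [pvG_nonpos cs C (by omega)]
  intro s
  exact main s.toNat s rfl

theorem pvG_le_cap (cs : List Int) (C : Int) (hC : 0 ≤ C) (s : Int) : pvG cs C s ≤ C := by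
  by_cases hs1 : 1 ≤ s
  · obtain ⟨m, hm⟩ : ∃ m : Nat, s = (m : Int) + 1 := ⟨s.toNat - 1, by omega⟩
    subst hm
    rw [pvG_rec]
    exact pv_foldl_le_init _ _ _ C
  · rw [pvG_nonpos cs C (by omega)]; exact hC

theorem pvG_one_le (cs : List Int) (C : Int) (hC : 1 ≤ C) {s : Int} (hs : 1 ≤ s) :
    1 ≤ pvG cs C s := by
  obtain ⟨m, hm⟩ : ∃ m : Nat, s = (m : Int) + 1 := ⟨s.toNat - 1, by omega⟩
  subst hm
  rw [pvG_rec]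
  apply pv_le_foldl _ _ _ _ C hC
  intro c hc h1 h2
  have := pvG_nonneg cs C (by omega) ((m : Int) + 1 - c)
  omega

theorem pvG_le_step (cs : List Int) (C : Int) {c s : Int} (hc : c ∈ cs) (h1 : 1 ≤ c)
    (h2 : c ≤ s) : pvG cs C s ≤ 1 + pvG cs C (s - c) := by
  obtain ⟨m, hm⟩ : ∃ m : Nat, s = (m : Int) + 1 := ⟨s.toNat - 1, by omega⟩
  subst hm
  rw [pvG_rec]
  exact pv_foldl_le_term _ _ hc h1 h2 C

theorem pvG_achieve (cs : List Int) (C : Int) {s : Int} (hs : 1 ≤ s)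
    (hlt : pvG cs C s < C) :
    ∃ c ∈ cs, 1 ≤ c ∧ c ≤ s ∧ pvG cs C s = 1 + pvG cs C (s - c) := by
  obtain ⟨m, hm⟩ : ∃ m : Nat, s = (m : Int) + 1 := ⟨s.toNat - 1, by omega⟩
  subst hm
  rcases pv_foldl_cases (pvG cs C) ((m : Int) + 1) cs C with h | ⟨c, hc, h1, h2, h3⟩
  · rw [pvG_rec, h] at hlt
    exact absurd hlt (lt_irrefl C)
  · exact ⟨c, hc, h1, h2, by rw [pvG_rec]; exact h3⟩

theorem pvG_le_self (cs : List Int) (C : Int) :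
    ∀ s : Int, 0 ≤ s → pvG cs C s < C → pvG cs C s ≤ s := by
  have main : ∀ k : Nat, ∀ s : Int, s.toNat = k → 0 ≤ s → pvG cs C s < C → pvG cs C s ≤ s := by
    intro k
    induction k using Nat.strong_induction_on with
    | _ k ihk =>
      intro s hsk hs0 hlt
      by_cases hs1 : 1 ≤ s
      · obtain ⟨c, hc, h1, h2, heq⟩ := pvG_achieve cs C hs1 hlt
        have hrec : pvG cs C (s - c) ≤ s - c :=
          ihk (s - c).toNat (by omega) _ rfl (by omega) (by omega)
        omega
      · rw [pvG_nonpos cs C (by omega)]; omega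
  intro s
  exact main s.toNat s rfl

-- ---- model of B: BFS state invariant ----
-- The dist table during level d, parameterised by the set of amounts discovered so far at level d.
def pvTblF (cs : List Int) (C d : Int) (acc : List Int) (j : Int) : Int :=
  if pvG cs C j ≤ d - 1 then pvG cs C j else if j ∈ acc then d else C

-- one frontier node's coin loop preserves the invariant
theorem pv_bfs_coins (cs : List Int) (t : Nat) {d s : Int}
    (hdt : d ≤ (t : Int)) (hs0 : 0 ≤ s)
    (hgs : pvG cs ((t : Int) + 1) s = d - 1) :
    ∀ (l : List Int), (∀ c ∈ l, c ∈ cs) → ∀ (acc : List Int),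
    (∀ x ∈ acc, 0 ≤ x ∧ x ≤ (t : Int) ∧ pvG cs ((t : Int) + 1) x = d) →
    ∃ acc',
      l.foldl
        (fun (st3 : List Int × List Int) c =>
          if 0 < c ∧ s + c ≤ (t : Int) ∧ d < PySem.List.pyGetD st3.1 (s + c) 0 then
            (PySem.List.pySetD st3.1 (s + c) d, st3.2 ++ [s + c])
          else st3)
        (pvTbl (t + 1) (pvTblF cs ((t : Int) + 1) d acc), acc)
      = (pvTbl (t + 1) (pvTblF cs ((t : Int) + 1) d acc'), acc')
      ∧ (∀ x ∈ acc', 0 ≤ x ∧ x ≤ (t : Int) ∧ pvG cs ((t : Int) + 1) x = d)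
      ∧ (∀ x ∈ acc, x ∈ acc')
      ∧ (∀ c ∈ l, 1 ≤ c → s + c ≤ (t : Int) → pvG cs ((t : Int) + 1) (s + c) = d → s + c ∈ acc') := by
  intro l
  induction l with
  | nil =>
    intro _ acc hacc
    exact ⟨acc, rfl, hacc, fun x hx => hx, fun c hc => absurd hc (List.not_mem_nil)⟩
  | cons c l ih =>
    intro hl acc hacc
    have hccs : c ∈ cs := hl c List.mem_cons_self
    have hl' : ∀ x ∈ l, x ∈ cs := fun x hx => hl x (List.mem_cons_of_mem _ hx)
    rw [List.foldl_cons]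
    by_cases hcr : 0 < c ∧ s + c ≤ (t : Int)
    · obtain ⟨hc0, hct⟩ := hcr
      have hb0 : (0 : Int) ≤ s + c := by omega
      have hb1 : s + c < ((t + 1 : Nat) : Int) := by push_cast; omega
      have hget : PySem.List.pyGetD (pvTbl (t + 1) (pvTblF cs ((t : Int) + 1) d acc)) (s + c) 0
          = pvTblF cs ((t : Int) + 1) d acc (s + c) := pvTbl_pyGetD _ hb0 hb1
      have hgle : pvG cs ((t : Int) + 1) (s + c) ≤ d := by
        have h2 : c ≤ s + c := by omega
        have := pvG_le_step cs ((t : Int) + 1) hccs (by omega) h2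
        have hsc : s + c - c = s := by ring
        rw [hsc, hgs] at this
        omega
      by_cases hle : pvG cs ((t : Int) + 1) (s + c) ≤ d - 1
      · have hval : pvTblF cs ((t : Int) + 1) d acc (s + c) = pvG cs ((t : Int) + 1) (s + c) := by
          unfold pvTblF; rw [if_pos hle]
        rw [if_neg (by rw [hget, hval]; omega)]
        obtain ⟨acc', heq, hsound, hmono, hcomp⟩ := ih hl' acc hacc
        refine ⟨acc', heq, hsound, hmono, ?_⟩
        intro c' hc' h1 h2 h3
        rcases List.mem_cons.mp hc' with hcc | htl
        · subst hcc; omega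
        · exact hcomp c' htl h1 h2 h3
      · have hgd : pvG cs ((t : Int) + 1) (s + c) = d := by omega
        by_cases hmem : (s + c) ∈ acc
        · have hval : pvTblF cs ((t : Int) + 1) d acc (s + c) = d := by
            unfold pvTblF; rw [if_neg hle, if_pos hmem]
          rw [if_neg (by rw [hget, hval]; omega)]
          obtain ⟨acc', heq, hsound, hmono, hcomp⟩ := ih hl' acc hacc
          refine ⟨acc', heq, hsound, hmono, ?_⟩
          intro c' hc' h1 h2 h3
          rcases List.mem_cons.mp hc' with hcc | htl
          · subst hcc; exact hmono _ hmem
          · exact hcomp c' htl h1 h2 h3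
        · have hval : pvTblF cs ((t : Int) + 1) d acc (s + c) = (t : Int) + 1 := by
            unfold pvTblF; rw [if_neg hle, if_neg hmem]
          rw [if_pos (by rw [hget, hval]; exact ⟨hc0, hct, by omega⟩)]
          have hset : PySem.List.pySetD (pvTbl (t + 1) (pvTblF cs ((t : Int) + 1) d acc)) (s + c) d
              = pvTbl (t + 1) (pvTblF cs ((t : Int) + 1) d (acc ++ [s + c])) := by
            rw [pvTbl_pySetD _ d hb0 hb1]
            apply pvTbl_congr
            intro k hk
            by_cases hks : ((k : Nat) : Int) = s + c
            · rw [if_pos hks]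
              unfold pvTblF
              rw [hks, if_neg hle, if_pos (by simp)]
            · rw [if_neg hks]
              unfold pvTblF
              by_cases hk1 : pvG cs ((t : Int) + 1) ((k : Nat) : Int) ≤ d - 1
              · rw [if_pos hk1, if_pos hk1]
              · rw [if_neg hk1, if_neg hk1]
                have : (((k : Nat) : Int) ∈ acc ++ [s + c]) ↔ (((k : Nat) : Int) ∈ acc) := by
                  simp [List.mem_append, hks]
                by_cases hk2 : ((k : Nat) : Int) ∈ acc
                · rw [if_pos hk2, if_pos (this.mpr hk2)]
                · rw [if_neg hk2, if_neg (by rw [this]; exact hk2)]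
          rw [hset]
          have hacc' : ∀ x ∈ acc ++ [s + c],
              0 ≤ x ∧ x ≤ (t : Int) ∧ pvG cs ((t : Int) + 1) x = d := by
            intro x hx
            rcases List.mem_append.mp hx with hx | hx
            · exact hacc x hx
            · have : x = s + c := by simpa using hx
              subst this
              exact ⟨hb0, hct, hgd⟩
          obtain ⟨acc', heq, hsound, hmono, hcomp⟩ := ih hl' (acc ++ [s + c]) hacc'
          refine ⟨acc', heq, hsound, fun x hx => hmono x (by simp [hx]), ?_⟩
          intro c' hc' h1 h2 h3
          rcases List.mem_cons.mp hc' with hcc | htl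
          · subst hcc; exact hmono _ (by simp)
          · exact hcomp c' htl h1 h2 h3
    · rw [if_neg (by tauto)]
      obtain ⟨acc', heq, hsound, hmono, hcomp⟩ := ih hl' acc hacc
      refine ⟨acc', heq, hsound, hmono, ?_⟩
      intro c' hc' h1 h2 h3
      rcases List.mem_cons.mp hc' with hcc | htl
      · subst hcc; exact absurd ⟨by omega, h2⟩ hcr
      · exact hcomp c' htl h1 h2 h3

-- the whole frontier loop of one level preserves the invariant and discovers every successor
theorem pv_bfs_frontier (cs : List Int) (t : Nat) {d : Int}
    (hdt : d ≤ (t : Int)) :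
    ∀ (fr : List Int), (∀ s ∈ fr, 0 ≤ s ∧ s ≤ (t : Int) ∧ pvG cs ((t : Int) + 1) s = d - 1) →
    ∀ (acc : List Int), (∀ x ∈ acc, 0 ≤ x ∧ x ≤ (t : Int) ∧ pvG cs ((t : Int) + 1) x = d) →
    ∃ acc',
      fr.foldl
        (fun (st2 : List Int × List Int) s =>
          cs.foldl
            (fun (st3 : List Int × List Int) c =>
              if 0 < c ∧ s + c ≤ (t : Int) ∧ d < PySem.List.pyGetD st3.1 (s + c) 0 then
                (PySem.List.pySetD st3.1 (s + c) d, st3.2 ++ [s + c])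
              else st3)
            st2)
        (pvTbl (t + 1) (pvTblF cs ((t : Int) + 1) d acc), acc)
      = (pvTbl (t + 1) (pvTblF cs ((t : Int) + 1) d acc'), acc')
      ∧ (∀ x ∈ acc', 0 ≤ x ∧ x ≤ (t : Int) ∧ pvG cs ((t : Int) + 1) x = d)
      ∧ (∀ x ∈ acc, x ∈ acc')
      ∧ (∀ s ∈ fr, ∀ c ∈ cs, 1 ≤ c → s + c ≤ (t : Int) →
          pvG cs ((t : Int) + 1) (s + c) = d → s + c ∈ acc') := by
  intro fr
  induction fr with
  | nil =>
    intro _ acc hacc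
    exact ⟨acc, rfl, hacc, fun x hx => hx, fun s hs => absurd hs (List.not_mem_nil)⟩
  | cons s fr ih =>
    intro hfr acc hacc
    obtain ⟨hs0, hst, hgs⟩ := hfr s List.mem_cons_self
    have hfr' : ∀ x ∈ fr, 0 ≤ x ∧ x ≤ (t : Int) ∧ pvG cs ((t : Int) + 1) x = d - 1 :=
      fun x hx => hfr x (List.mem_cons_of_mem _ hx)
    rw [List.foldl_cons]
    obtain ⟨acc1, heq1, hsound1, hmono1, hcomp1⟩ :=
      pv_bfs_coins cs t hdt hs0 hgs cs (fun c hc => hc) acc hacc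
    rw [heq1]
    obtain ⟨acc', heq, hsound, hmono, hcomp⟩ := ih hfr' acc1 hsound1
    refine ⟨acc', heq, hsound, fun x hx => hmono x (hmono1 x hx), ?_⟩
    intro s' hs' c hc h1 h2 h3
    rcases List.mem_cons.mp hs' with hss | htl
    · subst hss
      exact hmono _ (hcomp1 c hc h1 h2 h3)
    · exact hcomp s' htl c hc h1 h2 h3

-- one full level: the dist table advances from cutoff d-1 to cutoff d
theorem pv_bfs_level (cs : List Int) (t : Nat) {d : Int}
    (hd1 : 1 ≤ d) (hdt : d ≤ (t : Int)) (fr : List Int)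
    (hfr : ∀ s ∈ fr, 0 ≤ s ∧ s ≤ (t : Int) ∧ pvG cs ((t : Int) + 1) s = d - 1)
    (hfrc : ∀ s : Int, 0 ≤ s → s ≤ (t : Int) → pvG cs ((t : Int) + 1) s = d - 1 → s ∈ fr) :
    ∃ nxt,
      fr.foldl
        (fun (st2 : List Int × List Int) s =>
          cs.foldl
            (fun (st3 : List Int × List Int) c =>
              if 0 < c ∧ s + c ≤ (t : Int) ∧ d < PySem.List.pyGetD st3.1 (s + c) 0 then
                (PySem.List.pySetD st3.1 (s + c) d, st3.2 ++ [s + c])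
              else st3)
            st2)
        (pvTbl (t + 1)
          (fun j => if pvG cs ((t : Int) + 1) j ≤ d - 1 then pvG cs ((t : Int) + 1) j
                    else (t : Int) + 1), ([] : List Int))
      = (pvTbl (t + 1)
          (fun j => if pvG cs ((t : Int) + 1) j ≤ d then pvG cs ((t : Int) + 1) j
                    else (t : Int) + 1), nxt)
      ∧ (∀ x ∈ nxt, 0 ≤ x ∧ x ≤ (t : Int) ∧ pvG cs ((t : Int) + 1) x = d)
      ∧ (∀ x : Int, 0 ≤ x → x ≤ (t : Int) → pvG cs ((t : Int) + 1) x = d → x ∈ nxt) := by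
  have hinit : pvTbl (t + 1)
      (fun j => if pvG cs ((t : Int) + 1) j ≤ d - 1 then pvG cs ((t : Int) + 1) j
                else (t : Int) + 1)
      = pvTbl (t + 1) (pvTblF cs ((t : Int) + 1) d []) := by
    apply pvTbl_congr
    intro k hk
    unfold pvTblF
    by_cases h1 : pvG cs ((t : Int) + 1) ((k : Nat) : Int) ≤ d - 1
    · rw [if_pos h1, if_pos h1]
    · rw [if_neg h1, if_neg h1, if_neg (List.not_mem_nil)]
  rw [hinit]
  obtain ⟨acc', heq, hsound, _, hcomp⟩ :=
    pv_bfs_frontier cs t hdt fr hfr [] (fun x hx => absurd hx (List.not_mem_nil))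
  have hcomplete : ∀ x : Int, 0 ≤ x → x ≤ (t : Int) → pvG cs ((t : Int) + 1) x = d → x ∈ acc' := by
    intro x hx0 hxt hxd
    have hx1 : 1 ≤ x := by
      by_contra h
      rw [pvG_nonpos cs ((t : Int) + 1) (by omega)] at hxd
      omega
    obtain ⟨c, hc, h1, h2, heqc⟩ :=
      pvG_achieve cs ((t : Int) + 1) hx1 (by omega)
    have hgxc : pvG cs ((t : Int) + 1) (x - c) = d - 1 := by omega
    have hmem : (x - c) ∈ fr := hfrc (x - c) (by omega) (by omega) hgxc
    have hxc : (x - c) + c = x := by ring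
    have := hcomp (x - c) hmem c hc h1 (by omega) (by rw [hxc]; exact hxd)
    rw [hxc] at this
    exact this
  refine ⟨acc', ?_, hsound, hcomplete⟩
  rw [heq]
  congr 1
  apply pvTbl_congr
  intro k hk
  unfold pvTblF
  by_cases h1 : pvG cs ((t : Int) + 1) ((k : Nat) : Int) ≤ d - 1
  · rw [if_pos h1, if_pos (by omega)]
  · rw [if_neg h1]
    by_cases h2 : pvG cs ((t : Int) + 1) ((k : Nat) : Int) ≤ d
    · have hgd : pvG cs ((t : Int) + 1) ((k : Nat) : Int) = d := by omega
      rw [if_pos (hcomplete _ (by omega) (by omega) hgd), if_pos h2, hgd]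
    · have hnot : ((k : Nat) : Int) ∉ acc' := by
        intro hmem
        have := (hsound _ hmem).2.2
        omega
      rw [if_neg hnot, if_neg h2]

-- the whole BFS loop: after level m the dist table holds every value ≤ m
theorem pv_bfs_outer (cs : List Int) (t : Nat) : ∀ m : Nat, m ≤ t →
    ∃ fr,
      (PySem.List.pyRange 1 ((m : Int) + 1) 1).foldl
        (fun (st : List Int × List Int) d =>
          st.2.foldl
            (fun (st2 : List Int × List Int) s =>
              cs.foldl
                (fun (st3 : List Int × List Int) c =>
                  if 0 < c ∧ s + c ≤ (t : Int) ∧ d < PySem.List.pyGetD st3.1 (s + c) 0 then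
                    (PySem.List.pySetD st3.1 (s + c) d, st3.2 ++ [s + c])
                  else st3)
                st2)
            (st.1, ([] : List Int)))
        (pvTbl (t + 1) (fun j => if j = 0 then 0 else (t : Int) + 1), [0])
      = (pvTbl (t + 1)
          (fun j => if pvG cs ((t : Int) + 1) j ≤ (m : Int) then pvG cs ((t : Int) + 1) j
                    else (t : Int) + 1), fr)
      ∧ (∀ s ∈ fr, 0 ≤ s ∧ s ≤ (t : Int) ∧ pvG cs ((t : Int) + 1) s = (m : Int))
      ∧ (∀ s : Int, 0 ≤ s → s ≤ (t : Int) → pvG cs ((t : Int) + 1) s = (m : Int) → s ∈ fr) := by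
  intro m
  induction m with
  | zero =>
    intro _
    refine ⟨[0], ?_, ?_, ?_⟩
    · simp only [Nat.cast_zero, zero_add]
      rw [show PySem.List.pyRange 1 1 1 = ([] : List Int) from rfl]
      simp only [List.foldl_nil]
      congr 1
      apply pvTbl_congr
      intro k hk
      by_cases hk0 : ((k : Nat) : Int) = 0
      · rw [if_pos hk0, hk0, pvG_nonpos cs ((t : Int) + 1) (by omega), if_pos (by omega)]
      · rw [if_neg hk0]
        have := pvG_one_le cs ((t : Int) + 1) (by omega) (show (1 : Int) ≤ ((k : Nat) : Int) by omega)
        rw [if_neg (by omega)]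
    · intro s hs
      have : s = 0 := by simpa using hs
      subst this
      exact ⟨le_refl _, by omega, by rw [pvG_nonpos cs ((t : Int) + 1) (le_refl 0)]; simp⟩
    · intro s hs0 hst hgs
      have hs : s = 0 := by
        by_contra h
        have := pvG_one_le cs ((t : Int) + 1) (by omega) (show (1 : Int) ≤ s by omega)
        simp only [Nat.cast_zero] at hgs
        omega
      simp [hs]
  | succ m ih =>
    intro hm
    obtain ⟨fr, heq, hsound, hcomp⟩ := ih (by omega)
    rw [show ((m + 1 : Nat) : Int) + 1 = (((m : Nat) : Int) + 1) + 1 from by push_cast; ring,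
      PySem.List.pyRange_one_succ_right (by omega : (1 : Int) ≤ (m : Int) + 1),
      List.foldl_append, heq]
    simp only [List.foldl_cons, List.foldl_nil]
    obtain ⟨nxt, hleq, hnsound, hncomp⟩ :=
      pv_bfs_level cs t (show (1 : Int) ≤ (m : Int) + 1 by omega)
        (show (m : Int) + 1 ≤ (t : Int) by omega) fr
        (fun s hs => ⟨(hsound s hs).1, (hsound s hs).2.1, by rw [(hsound s hs).2.2]; ring⟩)
        (fun s hs0 hst hgs => hcomp s hs0 hst (by omega))
    have hstart :
        pvTbl (t + 1)
          (fun j => if pvG cs ((t : Int) + 1) j ≤ (m : Int) then pvG cs ((t : Int) + 1) j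
                    else (t : Int) + 1)
        = pvTbl (t + 1)
          (fun j => if pvG cs ((t : Int) + 1) j ≤ ((m : Int) + 1) - 1 then pvG cs ((t : Int) + 1) j
                    else (t : Int) + 1) := by
      apply pvTbl_congr
      intro k hk
      by_cases h1 : pvG cs ((t : Int) + 1) ((k : Nat) : Int) ≤ (m : Int)
      · rw [if_pos h1, if_pos (by omega)]
      · rw [if_neg h1, if_neg (by omega)]
    rw [hstart, hleq]
    refine ⟨nxt, ?_, ?_, ?_⟩
    · congr 1
    · intro s hs
      exact ⟨(hnsound s hs).1, (hnsound s hs).2.1, by rw [(hnsound s hs).2.2]; push_cast; ring⟩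
    · intro s hs0 hst hgs
      exact hncomp s hs0 hst (by rw [hgs]; push_cast; ring)

-- ---- simulation: port A computes pvG ----
theorem pvA_inner (n : Nat) (s : Int) (hs0 : 0 ≤ s) (hsn : s < (n : Int)) (b : Int → Int) :
    ∀ (cs : List Int), (∀ c ∈ cs, 0 ≤ c) → ∀ v : Int,
    cs.foldl
      (fun res coin =>
        if coin ≤ s then
          PySem.List.pySetD res s
            (min (PySem.List.pyGetD res s 0) (1 + PySem.List.pyGetD res (s - coin) 0))
        else res)
      (pvTbl n (fun j => if j = s then v else b j))
    = pvTbl n (fun j => if j = s then cs.foldl (pvStepG b s) v else b j) := by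
  intro cs
  induction cs with
  | nil => intro _ v; rfl
  | cons c cs ih =>
    intro hcs v
    have hc : 0 ≤ c := hcs c List.mem_cons_self
    have hcs' : ∀ x ∈ cs, 0 ≤ x := fun x hx => hcs x (List.mem_cons_of_mem _ hx)
    simp only [List.foldl_cons]
    have hupd :
        (if c ≤ s then
          PySem.List.pySetD (pvTbl n fun j => if j = s then v else b j) s
            (min (PySem.List.pyGetD (pvTbl n fun j => if j = s then v else b j) s 0)
                 (1 + PySem.List.pyGetD (pvTbl n fun j => if j = s then v else b j) (s - c) 0))
        else (pvTbl n fun j => if j = s then v else b j))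
        = pvTbl n (fun j => if j = s then pvStepG b s v c else b j) := by
      by_cases hcle : c ≤ s
      · rw [if_pos hcle,
          pvTbl_pyGetD _ hs0 hsn,
          pvTbl_pyGetD _ (show (0:Int) ≤ s - c from by omega) (show s - c < (n:Int) from by omega),
          pvTbl_pySetD _ _ hs0 hsn]
        rw [if_pos rfl]
        by_cases hc1 : 1 ≤ c
        · rw [if_neg (show ¬(s - c = s) from by omega)]
          apply pvTbl_congr
          intro k hk
          by_cases hks : ((k : Nat) : Int) = s
          · rw [if_pos hks, if_pos hks, pvStepG, if_pos ⟨hc1, hcle⟩]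
          · simp only [if_neg hks]
        · have hc0 : c = 0 := by omega
          subst hc0
          rw [sub_zero, if_pos rfl]
          apply pvTbl_congr
          intro k hk
          by_cases hks : ((k : Nat) : Int) = s
          · rw [if_pos hks, if_pos hks, pvStepG,
              if_neg (show ¬((1:Int) ≤ 0 ∧ (0:Int) ≤ s) from by omega)]
            omega
          · simp only [if_neg hks]
      · rw [if_neg hcle]
        apply pvTbl_congr
        intro k hk
        by_cases hks : ((k : Nat) : Int) = s
        · rw [if_pos hks, if_pos hks, pvStepG, if_neg (show ¬(1 ≤ c ∧ c ≤ s) from by omega)]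
        · simp only [if_neg hks]
    rw [hupd]
    exact ih hcs' (pvStepG b s v c)

theorem pvA_outer (coins : List Int) (T : Int) (n : Nat) (hcs : ∀ c ∈ coins, 0 ≤ c) :
    ∀ m : Nat, m < n →
    (PySem.List.pyRange 1 ((m : Int) + 1) 1).foldl
      (fun res sub_target =>
        coins.foldl
          (fun res coin =>
            if coin ≤ sub_target then
              PySem.List.pySetD res sub_target
                (min (PySem.List.pyGetD res sub_target 0)
                     (1 + PySem.List.pyGetD res (sub_target - coin) 0))
            else res)
          res)
      (pvTbl n (fun j => if j = 0 then 0 else T))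
    = pvTbl n (fun j => if j ≤ (m : Int) then pvG coins T j else T) := by
  intro m
  induction m with
  | zero =>
    intro hm
    simp only [Nat.cast_zero, zero_add]
    rw [show PySem.List.pyRange 1 1 1 = ([] : List Int) from rfl]
    simp only [List.foldl_nil]
    apply pvTbl_congr
    intro k hk
    by_cases hk0 : ((k : Nat) : Int) = 0
    · rw [if_pos hk0, if_pos (by omega), hk0, pvG_nonpos coins T (by omega)]
    · rw [if_neg hk0, if_neg (by omega)]
  | succ m ih =>
    intro hm
    have hmn : m < n := by omega
    rw [show ((m + 1 : Nat) : Int) + 1 = (((m : Nat) : Int) + 1) + 1 from by push_cast; ring,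
      PySem.List.pyRange_one_succ_right (by omega : (1 : Int) ≤ (m : Int) + 1),
      List.foldl_append, ih hmn]
    simp only [List.foldl_cons, List.foldl_nil]
    have hb0 : pvTbl n (fun j => if j ≤ (m : Int) then pvG coins T j else T)
        = pvTbl n (fun j => if j = (m : Int) + 1 then T
            else (fun j => if j ≤ (m : Int) then pvG coins T j else T) j) := by
      apply pvTbl_congr
      intro k hk
      by_cases hks : ((k : Nat) : Int) = (m : Int) + 1
      · rw [if_pos hks, if_neg (by omega)]
      · rw [if_neg hks]
    rw [hb0, pvA_inner n ((m : Int) + 1) (by omega) (by omega) _ coins hcs T]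
    have hfold : coins.foldl
        (pvStepG (fun j => if j ≤ (m : Int) then pvG coins T j else T) ((m : Int) + 1)) T
        = pvG coins T ((m : Int) + 1) := by
      rw [pvG_rec coins T m]
      apply List.foldl_ext
      intro a c hc
      unfold pvStepG
      by_cases hg : 1 ≤ c ∧ c ≤ (m : Int) + 1
      · rw [if_pos hg, if_pos hg]
        beta_reduce
        rw [if_pos (show (m : Int) + 1 - c ≤ (m : Int) from by omega)]
      · rw [if_neg hg, if_neg hg]
    rw [hfold]
    apply pvTbl_congr
    intro k hk
    by_cases h1 : ((k : Nat) : Int) = (m : Int) + 1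
    · rw [if_pos h1, if_pos (by omega), h1]
    · rw [if_neg h1]
      by_cases h2 : ((k : Nat) : Int) ≤ (m : Int)
      · rw [if_pos h2, if_pos (by omega)]
      · rw [if_neg h2, if_neg (by omega)]

theorem pvInit (n : Nat) (T : Int) (hn : 1 ≤ n) :
    PySem.List.pySetD (List.replicate n T) 0 0 = pvTbl n (fun j => if j = 0 then 0 else T) := by
  rw [pySetD_set (List.replicate n T) 0 (le_refl 0) (by simpa using by omega)]
  apply List.ext_getElem
  · simp [pvTbl]
  · intro k hk1 hk2
    have hk : k < n := by simpa using hk1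
    rw [List.getElem_set, pvTbl_getElem (fun j => if j = 0 then 0 else T) hk]
    by_cases hk0 : k = 0
    · subst hk0
      simp
    · rw [if_neg (by omega), List.getElem_replicate, if_neg (by omega)]

-- ===== VERDICT (by name: the statement is the Claim_ definition above) =====
theorem min_step_target_spec : Claim_equal_min_step_target := by
  unfold Claim_equal_min_step_target
  intro coins_ target_ hdom hpre
  obtain ⟨ht0, hco⟩ := hpre
  unfold Spec_min_step_target
  by_cases ht1 : 1 ≤ target_
  · have hcs : ∀ c ∈ coins_, 0 ≤ c := hco ht1
    obtain ⟨t, htt⟩ : ∃ t : Nat, target_ = (t : Int) := ⟨target_.toNat, by omega⟩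
    subst htt
    unfold min_step_target min_step_target_alt
    rw [show ((t : Int) + 1).toNat = t + 1 from by omega,
      pvInit (t + 1) ((t : Int) + 1) (by omega),
      pvA_outer coins_ ((t : Int) + 1) (t + 1) hcs t (by omega)]
    obtain ⟨fr, heq, _, _⟩ := pv_bfs_outer coins_ t t (le_refl t)
    rw [heq]
    show pvTbl (t + 1) (fun j => if j ≤ (t : Int) then pvG coins_ ((t : Int) + 1) j else (t : Int) + 1)
      = pvTbl (t + 1) (fun j => if pvG coins_ ((t : Int) + 1) j ≤ (t : Int)
          then pvG coins_ ((t : Int) + 1) j else (t : Int) + 1)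
    apply pvTbl_congr
    intro k hk
    rw [if_pos (show ((k : Nat) : Int) ≤ (t : Int) from by omega)]
    by_cases h1 : pvG coins_ ((t : Int) + 1) ((k : Nat) : Int) ≤ (t : Int)
    · rw [if_pos h1]
    · rw [if_neg h1]
      have hcap := pvG_le_cap coins_ ((t : Int) + 1) (by omega) ((k : Nat) : Int)
      have hself := pvG_le_self coins_ ((t : Int) + 1) ((k : Nat) : Int) (by omega)
      omega
  · have hz : target_ = 0 := by omega
    subst hz
    unfold min_step_target min_step_target_alt
    simp only [show (0:Int) + 1 = 1 from rfl,
      show PySem.List.pyRange 1 1 1 = ([] : List Int) from rfl,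
      List.foldl_nil]
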